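-- pv_equiv track=rewrite | github.com/8fdafs2/Codewars-Solu-Python | src/kyu5_Sierpinskis_Gasket.py | sierpinski_05
-- ===== SOURCE A (Python) =====
-- from itertools import islice
--
-- def sierpinski_05(n):
--     """
--     format
--     """
--     rows = ['L', ]
--
--     tmp = 1
--     for i in range(n):
--         padding = '{{0:{0}s}}{{0}}'.format(tmp << 1)
--         rows.extend((padding.format(row) for row in islice(rows, tmp)))
--         tmp *= 2
--
--     return '\n'.join(rows)
-- ===== SOURCE B (Python) =====
-- def sierpinski_05(n):
--     count = 2 ** n if n > 0 else 1
--     rows = [''.join('L' if j % 2 == 0 and (j // 2) & r == j // 2 else ' '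
--                     for j in range(2 * r + 1))
--             for r in range(count)]
--     return '\n'.join(rows)
-- ===== Notes on version B (the rewrite author's own statement) =====
-- stated objective: alternative
-- what changed: B computes each row directly from the bitwise submask (Lucas) characterization -- 'L' at column 2c of row r iff c & r == c -- instead of A's doubling loop that repeatedly pads and re-appends the existing rows.
import Mathlib
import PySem

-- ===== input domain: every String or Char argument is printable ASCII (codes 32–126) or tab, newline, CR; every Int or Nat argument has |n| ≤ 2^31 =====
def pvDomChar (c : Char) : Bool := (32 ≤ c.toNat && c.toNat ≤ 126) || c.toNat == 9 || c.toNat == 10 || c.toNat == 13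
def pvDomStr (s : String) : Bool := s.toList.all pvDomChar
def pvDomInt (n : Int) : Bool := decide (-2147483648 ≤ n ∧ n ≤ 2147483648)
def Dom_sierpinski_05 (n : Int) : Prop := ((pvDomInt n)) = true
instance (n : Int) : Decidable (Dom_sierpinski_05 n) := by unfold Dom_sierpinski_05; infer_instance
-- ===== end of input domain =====

-- B replaces A's row-doubling/padding loop by computing each row directly from the
-- bitwise submask (Lucas) characterization: row r has 'L' at column 2c iff c &&& r = c.

-- ===== PORT A =====
-- rows are modelled as lists of characters; '{0:Ws}' left-justifies (pads on the right to width W)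
def pvLjust (s : List Char) (w : Nat) : List Char := s ++ List.replicate (w - s.length) ' '

-- one iteration of A's for-loop body: extend rows by the padded copies of the first tmp rows
def pvStepA (st : List (List Char) × Nat) (_i : Int) : List (List Char) × Nat :=
  (st.1 ++ (st.1.take st.2).map (fun row => pvLjust row (2 * st.2) ++ row), st.2 * 2)

def sierpinski_05 (n : Int) : String :=
  let st := (PySem.List.pyRange 0 n 1).foldl pvStepA ([['L']], 1)
  PySem.Str.join "\n" (st.1.map String.mk)

-- ===== PORT B =====
-- row r of the gasket: 'L' at even position 2c when c is a submask of r, space elsewhere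
def pvRowB (r : Nat) : List Char :=
  (List.range (2 * r + 1)).map (fun j => if j % 2 = 0 ∧ (j / 2) &&& r = j / 2 then 'L' else ' ')

def sierpinski_05_alt (n : Int) : String :=
  let count : Nat := if 0 < n then 2 ^ n.toNat else 1
  PySem.Str.join "\n" ((List.range count).map (fun r => String.mk (pvRowB r)))

-- ===== PRECONDITION & SPEC =====
def Spec_sierpinski_05 (n : Int) (out : String) : Prop := out = sierpinski_05_alt n
instance (n : Int) (out : String) : Decidable (Spec_sierpinski_05 n out) := by unfold Spec_sierpinski_05; infer_instance

-- ===== CLAIM (what is proved, stated in full; the proofs are below) =====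
def Claim_equal_sierpinski_05 : Prop := ∀ (n : Int), Dom_sierpinski_05 n → Spec_sierpinski_05 n (sierpinski_05 n)

-- ===== LEMMAS AND PROOFS =====

-- c &&& (2^k + i) = c &&& i  when both c and i are below 2^k
lemma pv_land_pow_add {k i c : Nat} (hi : i < 2 ^ k) (hc : c < 2 ^ k) :
    c &&& (2 ^ k + i) = c &&& i := by
  apply Nat.eq_of_testBit_eq
  intro j
  rcases lt_trichotomy j k with hj | hj | hj
  · simp [Nat.testBit_two_pow_add_gt hj]
  · subst hj
    simp [Nat.testBit_eq_false_of_lt hc]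
  · have h1 : (2 ^ k + i).testBit j = false := by
      apply Nat.testBit_eq_false_of_lt
      calc 2 ^ k + i < 2 ^ k + 2 ^ k := by omega
        _ = 2 ^ (k + 1) := by ring
        _ ≤ 2 ^ j := Nat.pow_le_pow_right (by norm_num) hj
    have h2 : i.testBit j = false :=
      Nat.testBit_eq_false_of_lt (lt_of_lt_of_le hi (Nat.pow_le_pow_right (by norm_num) hj.le))
    simp [h1, h2]

-- (2^k + c) &&& (2^k + i) = 2^k + (c &&& i)  when c, i < 2^k
lemma pv_land_pow_add_pow {k i c : Nat} (hi : i < 2 ^ k) (hc : c < 2 ^ k) :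
    (2 ^ k + c) &&& (2 ^ k + i) = 2 ^ k + (c &&& i) := by
  have hci : c &&& i < 2 ^ k := lt_of_le_of_lt Nat.and_le_right hi
  apply Nat.eq_of_testBit_eq
  intro j
  rcases lt_trichotomy j k with hj | hj | hj
  · simp [Nat.testBit_two_pow_add_gt hj]
  · subst hj
    simp [Nat.testBit_two_pow_add_eq,
      Nat.testBit_eq_false_of_lt hc, Nat.testBit_eq_false_of_lt hi,
      Nat.testBit_eq_false_of_lt hci]
  · have hb : ∀ x : Nat, x < 2 ^ k → (2 ^ k + x).testBit j = false := by
      intro x hx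
      apply Nat.testBit_eq_false_of_lt
      calc 2 ^ k + x < 2 ^ k + 2 ^ k := by omega
        _ = 2 ^ (k + 1) := by ring
        _ ≤ 2 ^ j := Nat.pow_le_pow_right (by norm_num) hj
    simp [hb c hc, hb i hi, hb _ hci]

lemma pv_length_rowB (r : Nat) : (pvRowB r).length = 2 * r + 1 := by
  simp [pvRowB]

-- the padded copy of row i IS row (2^k + i)
lemma pv_rowB_add {k i : Nat} (hi : i < 2 ^ k) :
    pvRowB (2 ^ k + i) = pvLjust (pvRowB i) (2 * 2 ^ k) ++ pvRowB i := by
  have hlen : 2 * i + 1 ≤ 2 * 2 ^ k := by omega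
  apply List.ext_getElem
  · simp [pv_length_rowB, pvLjust]
    omega
  · intro p h1 h2
    have hp : p < 2 * (2 ^ k + i) + 1 := by
      simpa [pv_length_rowB] using h1
    simp only [pvRowB, pvLjust, List.getElem_map, List.getElem_range]
    by_cases hcase1 : p < 2 * i + 1
    · -- inside the left (padded) copy, within row i itself
      rw [List.getElem_append_left (by simp [pv_length_rowB, pvRowB]; omega),
          List.getElem_append_left (by simp [pv_length_rowB, pvRowB]; omega)]
      simp only [pvRowB, List.getElem_map, List.getElem_range]
      by_cases hpar : p % 2 = 0
      · have hc : p / 2 < 2 ^ k := by omega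
        rw [pv_land_pow_add hi hc]
      · simp [hpar]
    · by_cases hcase2 : p < 2 * 2 ^ k
      · -- inside the right padding of the left copy: a space
        rw [List.getElem_append_left (by simp [pv_length_rowB, pvRowB, pvLjust]; omega),
            List.getElem_append_right (by simp [pv_length_rowB, pvRowB]; omega)]
        simp only [List.getElem_replicate]
        have : ¬ (p % 2 = 0 ∧ p / 2 &&& (2 ^ k + i) = p / 2) := by
          rintro ⟨hpar, heq⟩
          have hc : p / 2 < 2 ^ k := by omega
          have hgt : i < p / 2 := by omega
          rw [pv_land_pow_add hi hc] at heq
          have : p / 2 &&& i ≤ i := Nat.and_le_right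
          omega
        simp [this]
      · -- inside the second copy of row i
        rw [List.getElem_append_right (by simp [pv_length_rowB, pvRowB, pvLjust]; omega)]
        simp only [pvRowB, List.getElem_map, List.getElem_range, pvLjust,
          List.length_append, List.length_map, List.length_range, List.length_replicate]
        have hq : p - (2 * i + 1 + (2 * 2 ^ k - (2 * i + 1))) = p - 2 * 2 ^ k := by omega
        rw [hq]
        set q := p - 2 * 2 ^ k with hqdef
        have hq2 : q < 2 * i + 1 := by omega
        have hpar : p % 2 = q % 2 := by omega
        have hdiv : p / 2 = 2 ^ k + q / 2 := by omega
        rw [hpar, hdiv]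
        by_cases hparq : q % 2 = 0
        · have hc : q / 2 ≤ i := by omega
          rw [pv_land_pow_add_pow hi (by omega)]
          have : (2 ^ k + (q / 2 &&& i) = 2 ^ k + q / 2) ↔ (q / 2 &&& i = q / 2) := by omega
          simp [hparq, this]
        · simp [hparq]

-- iterating A's loop body, counting only the number of iterations (the loop variable is unused)
def pvIter : Nat → (List (List Char) × Nat) → List (List Char) × Nat
  | 0, st => st
  | k + 1, st => pvIter k (pvStepA st 0)

lemma pv_foldl_eq_iter (l : List Int) (st : List (List Char) × Nat) :
    l.foldl pvStepA st = pvIter l.length st := by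
  induction l generalizing st with
  | nil => rfl
  | cons a l ih =>
    simp only [List.foldl_cons, List.length_cons, pvIter]
    rw [ih]
    rfl

lemma pv_stepA_rows (m : Nat) :
    pvStepA ((List.range (2 ^ m)).map pvRowB, 2 ^ m) 0
      = ((List.range (2 ^ (m + 1))).map pvRowB, 2 ^ (m + 1)) := by
  unfold pvStepA
  simp only [Prod.mk.injEq]
  constructor
  · rw [List.take_of_length_le (by simp)]
    rw [List.map_map]
    have hmap : (List.range (2 ^ m)).map ((fun row => pvLjust row (2 * 2 ^ m) ++ row) ∘ pvRowB)
        = (List.range (2 ^ m)).map (fun i => pvRowB (2 ^ m + i)) := by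
      apply List.map_congr_left
      intro i hi
      rw [List.mem_range] at hi
      exact (pv_rowB_add hi).symm
    rw [hmap]
    have hr : 2 ^ (m + 1) = 2 ^ m + 2 ^ m := by ring
    rw [hr, List.range_add, List.map_append, List.map_map]
    rfl
  · ring

lemma pv_iter_spec (k m : Nat) :
    pvIter k ((List.range (2 ^ m)).map pvRowB, 2 ^ m)
      = ((List.range (2 ^ (m + k))).map pvRowB, 2 ^ (m + k)) := by
  induction k generalizing m with
  | zero => rfl
  | succ k ih =>
    show pvIter k (pvStepA _ 0) = _
    rw [pv_stepA_rows, ih (m + 1), show m + 1 + k = m + (k + 1) from by omega]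

lemma pv_rowB_zero : pvRowB 0 = ['L'] := by decide

-- ===== VERDICT (by name: the statement is the Claim_ definition above) =====
theorem sierpinski_05_spec : Claim_equal_sierpinski_05 := by
  intro n _
  show sierpinski_05 n = sierpinski_05_alt n
  unfold sierpinski_05 sierpinski_05_alt
  by_cases hn : 0 < n
  · have hlen : (PySem.List.pyRange 0 n 1).length = n.toNat := by
      rw [PySem.List.length_pyRange_one]; congr 1; omega
    rw [pv_foldl_eq_iter, hlen]
    have hstart : (([['L']], 1) : List (List Char) × Nat)
        = ((List.range (2 ^ 0)).map pvRowB, 2 ^ 0) := by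
      simp [pv_rowB_zero]
    rw [hstart, pv_iter_spec]
    simp [hn, List.map_map, Function.comp_def]
  · rw [PySem.List.pyRange_one_eq_nil (by omega)]
    simp [hn, pv_rowB_zero]
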